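-- pv_equiv track=rewrite | github.com/gaurav150/DSA | HACKEREARTH PROBLEMS/best_index.py | find_best_index_and_special_sum
-- ===== SOURCE A (Python) =====
-- def calculate_special_sum(arr, index, prefix_sum):
--     n = len(arr)
--     special_sum = 0
--     count = 1
--     current_index = index
--
--     while current_index + count <= n:
--         # Use prefix sum for O(1) range sum
--         group_sum = prefix_sum[current_index + count] - prefix_sum[current_index]
--         special_sum += group_sum
--         current_index += count
--         count += 1
--
--     return special_sum
--
-- def find_best_index_and_special_sum(arr):
--     n = len(arr)
--     # Precompute prefix sums
--     prefix_sum = [0] * (n + 1)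
--     for i in range(n):
--         prefix_sum[i + 1] = prefix_sum[i] + arr[i]
--
--     max_special_sum = float('-inf')
--     for i in range(n):
--         special_sum = calculate_special_sum(arr, i, prefix_sum)
--         max_special_sum = max(max_special_sum, special_sum)
--
--     return max_special_sum
-- ===== SOURCE B (Python) =====
-- def find_best_index_and_special_sum(arr):
--     # O(n): iterate i from n-1 down to 0; the total group-advance t for start i
--     # is the largest triangular number T_m with T_m <= n-i, maintained
--     # incrementally, and the special sum is prefix[i+t] - prefix[i].
--     n = len(arr)
--     prefix = [0] * (n + 1)
--     for i in range(n):
--         prefix[i + 1] = prefix[i] + arr[i]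
--     m = 0
--     t = 0
--     best = None
--     for i in range(n - 1, -1, -1):
--         rem = n - i
--         while t + m + 1 <= rem:
--             m += 1
--             t += m
--         v = prefix[i + t] - prefix[i]
--         best = v if best is None else max(best, v)
--     return best
-- ===== Notes on version B (the rewrite author's own statement) =====
-- stated objective: faster
-- what changed: Instead of re-walking the 1,2,3,... group chain for every start index, B iterates indices from right to left maintaining the largest triangular advance t incrementally, so each index's special sum is a single prefix-sum difference prefix[i+t]-prefix[i].
-- outside the precondition, e.g. on find_best_index_and_special_sum([]): A returns -inf, B returns None
import Mathlib
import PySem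

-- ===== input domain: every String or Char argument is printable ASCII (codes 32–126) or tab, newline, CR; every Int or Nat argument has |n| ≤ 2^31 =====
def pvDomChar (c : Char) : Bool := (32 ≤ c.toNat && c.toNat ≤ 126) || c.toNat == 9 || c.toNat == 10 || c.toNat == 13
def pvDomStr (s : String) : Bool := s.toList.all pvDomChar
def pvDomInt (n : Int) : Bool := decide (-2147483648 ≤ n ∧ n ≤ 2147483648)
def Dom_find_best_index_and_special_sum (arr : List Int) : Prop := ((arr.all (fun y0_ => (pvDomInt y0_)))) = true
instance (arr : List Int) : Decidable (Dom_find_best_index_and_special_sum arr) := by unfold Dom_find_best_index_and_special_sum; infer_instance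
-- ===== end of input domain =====

-- B replaces A's per-index group-walk by a right-to-left sweep that maintains the largest
-- triangular advance incrementally, making each index O(1) (objective: faster, asymptotic).


-- ===== PORT A =====
-- prefix_sum loop: prefix_sum[i+1] = prefix_sum[i] + arr[i]; all reads are in range,
-- so getD is exact here.
def pvBuildPrefixA (arr : List Int) : List Int :=
  (List.range arr.length).foldl (fun ps i => ps ++ [ps.getD i 0 + arr.getD i 0]) [0]

-- the while loop of calculate_special_sum; prefix reads are always in range (ci+count ≤ n).
def pvCalcLoop (n : Nat) (p : List Int) (ci count : Nat) (acc : Int) : Int :=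
  if ci + count ≤ n then
    pvCalcLoop n p (ci + count) (count + 1) (acc + (p.getD (ci + count) 0 - p.getD ci 0))
  else acc
termination_by n + 1 - ci - count
decreasing_by omega

-- max_special_sum = -inf is modeled by Option (it only reaches the return on arr = [],
-- which Pre_ excludes; .getD 0 is never the value A returns inside Pre_).
def find_best_index_and_special_sum (arr : List Int) : Int :=
  let n := arr.length
  let pfx := pvBuildPrefixA arr
  ((List.range n).foldl (fun acc i =>
      let s := pvCalcLoop n pfx i 1 0
      some (match acc with | none => s | some m => max m s)) (none : Option Int)).getD 0

-- ===== PORT B =====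
def pvBuildPrefixB (arr : List Int) : List Int :=
  (List.range arr.length).foldl (fun ps i => ps ++ [ps.getD i 0 + arr.getD i 0]) [0]

-- the inner while loop: advance (m, t) while t + m + 1 <= rem.
def pvAdvLoop (rem m t : Nat) : Nat × Nat :=
  if t + m + 1 ≤ rem then pvAdvLoop rem (m + 1) (t + m + 1) else (m, t)
termination_by rem - t
decreasing_by omega

-- the for loop over i = n-1, ..., 0 with state (m, t, best); prefix reads in range (t ≤ n-i).
def pvBLoop (n : Nat) (p : List Int) : List Nat → Nat × Nat × Option Int → Option Int
  | [], (_, _, b) => b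
  | i :: is, (m, t, b) =>
      let mt := pvAdvLoop (n - i) m t
      let v := p.getD (i + mt.2) 0 - p.getD i 0
      pvBLoop n p is (mt.1, mt.2, some (match b with | none => v | some x => max x v))

-- best = None is modeled by Option (None only reaches the return on arr = [], excluded by Pre_).
def find_best_index_and_special_sum_alt (arr : List Int) : Int :=
  let n := arr.length
  let pfx := pvBuildPrefixB arr
  (pvBLoop n pfx ((List.range n).reverse) (0, 0, none)).getD 0

-- ===== PRECONDITION & SPEC =====
-- Pre_ excludes only arr = [], where A returns float('-inf') — not an int — and B returns None.
def Pre_find_best_index_and_special_sum (arr : List Int) : Prop := arr ≠ []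
instance (arr : List Int) : Decidable (Pre_find_best_index_and_special_sum arr) := by unfold Pre_find_best_index_and_special_sum; infer_instance
def pvWitness_find_best_index_and_special_sum : List Int := [1, -2, 3]

def Spec_find_best_index_and_special_sum (arr : List Int) (out : Int) : Prop := out = find_best_index_and_special_sum_alt arr
instance (arr : List Int) (out : Int) : Decidable (Spec_find_best_index_and_special_sum arr out) := by unfold Spec_find_best_index_and_special_sum; infer_instance

-- ===== CLAIM (what is proved, stated in full; the proofs are below) =====
def Claim_equal_find_best_index_and_special_sum : Prop := ∀ (arr : List Int), Dom_find_best_index_and_special_sum arr → Pre_find_best_index_and_special_sum arr → Spec_find_best_index_and_special_sum arr (find_best_index_and_special_sum arr)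

-- ===== LEMMAS AND PROOFS =====

-- total advance performed by pvCalcLoop from state (ci, count)
def pvSkip (n ci count : Nat) : Nat :=
  if ci + count ≤ n then count + pvSkip n (ci + count) (count + 1) else 0
termination_by n + 1 - ci - count
decreasing_by omega

-- the max-accumulation step shared (definitionally) by both folds
def pvM (o : Option Int) (v : Int) : Option Int :=
  some (match o with | none => v | some m => max m v)

def pvNC : Option Int → Option Int → Option Int :=
  fun o q => match q with | none => o | some v => pvM o v

lemma pvCalcLoop_step (n : Nat) (p : List Int) (ci count : Nat) (acc : Int)
    (h : ci + count ≤ n) :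
    pvCalcLoop n p ci count acc =
      pvCalcLoop n p (ci + count) (count + 1) (acc + (p.getD (ci + count) 0 - p.getD ci 0)) := by
  conv_lhs => rw [pvCalcLoop]
  rw [if_pos h]

lemma pvCalcLoop_stop (n : Nat) (p : List Int) (ci count : Nat) (acc : Int)
    (h : ¬ ci + count ≤ n) : pvCalcLoop n p ci count acc = acc := by
  conv_lhs => rw [pvCalcLoop]
  rw [if_neg h]

lemma pvSkip_step (n ci count : Nat) (h : ci + count ≤ n) :
    pvSkip n ci count = count + pvSkip n (ci + count) (count + 1) := by
  conv_lhs => rw [pvSkip]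
  rw [if_pos h]

lemma pvSkip_stop (n ci count : Nat) (h : ¬ ci + count ≤ n) : pvSkip n ci count = 0 := by
  conv_lhs => rw [pvSkip]
  rw [if_neg h]

lemma pvAdvLoop_step (rem m t : Nat) (h : t + m + 1 ≤ rem) :
    pvAdvLoop rem m t = pvAdvLoop rem (m + 1) (t + m + 1) := by
  conv_lhs => rw [pvAdvLoop]
  rw [if_pos h]

lemma pvAdvLoop_stop (rem m t : Nat) (h : ¬ t + m + 1 ≤ rem) : pvAdvLoop rem m t = (m, t) := by
  conv_lhs => rw [pvAdvLoop]
  rw [if_neg h]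

lemma pvCalcLoop_eq (n : Nat) (p : List Int) (ci count : Nat) (acc : Int) :
    pvCalcLoop n p ci count acc = acc + (p.getD (ci + pvSkip n ci count) 0 - p.getD ci 0) := by
  induction ci, count, acc using pvCalcLoop.induct (n := n) (p := p) with
  | case1 ci count acc h ih =>
      rw [pvCalcLoop_step n p ci count acc h, ih, pvSkip_step n ci count h]
      have hidx : ci + (count + pvSkip n (ci + count) (count + 1)) =
          ci + count + pvSkip n (ci + count) (count + 1) := by omega
      rw [hidx]; ring
  | case2 ci count acc h =>
      rw [pvCalcLoop_stop n p ci count acc h, pvSkip_stop n ci count h]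
      simp

lemma pvAdvLoop_skip (rem m t : Nat) :
    ∀ n : Nat, rem ≤ n → (pvAdvLoop rem m t).2 = t + pvSkip n (n - rem + t) (m + 1) := by
  induction m, t using pvAdvLoop.induct (rem := rem) with
  | case1 m t h ih =>
      intro n hn
      rw [pvAdvLoop_step rem m t h, ih n hn, pvSkip_step n (n - rem + t) (m + 1) (by omega)]
      have heq : n - rem + (t + m + 1) = n - rem + t + (m + 1) := by omega
      rw [heq]
      omega
  | case2 m t h =>
      intro n hn
      rw [pvAdvLoop_stop rem m t h, pvSkip_stop n (n - rem + t) (m + 1) (by omega)]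
      simp

lemma pvAdvLoop_comp (rem' m t : Nat) :
    ∀ rem : Nat, rem' ≤ rem →
      pvAdvLoop rem (pvAdvLoop rem' m t).1 (pvAdvLoop rem' m t).2 = pvAdvLoop rem m t := by
  induction m, t using pvAdvLoop.induct (rem := rem') with
  | case1 m t h ih =>
      intro rem hr
      rw [pvAdvLoop_step rem' m t h]
      rw [ih rem hr]
      exact (pvAdvLoop_step rem m t (by omega)).symm
  | case2 m t h =>
      intro rem hr
      rw [pvAdvLoop_stop rem' m t h]

lemma pvM_nc (o : Option Int) (a : Int) : pvM o a = pvNC (some a) o := by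
  cases o <;> simp [pvM, pvNC, max_comm]

lemma foldl_pvM_eq (l : List Int) : ∀ o : Option Int, List.foldl pvM o l = pvNC o (List.foldl pvM none l) := by
  induction l with
  | nil => intro o; cases o <;> simp [pvNC]
  | cons a l ih =>
      intro o
      simp only [List.foldl_cons]
      rw [ih (pvM o a), ih (pvM none a)]
      have hna : pvM none a = some a := rfl
      rw [hna]
      cases h : List.foldl pvM none l with
      | none => cases o <;> simp [pvNC, pvM]
      | some v => cases o <;> simp [pvNC, pvM, max_assoc]

lemma foldl_pvM_reverse (l : List Int) : List.foldl pvM none l.reverse = List.foldl pvM none l := by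
  induction l with
  | nil => rfl
  | cons a l ih =>
      have : (a :: l).reverse = l.reverse ++ [a] := by simp
      rw [this, List.foldl_append, ih]
      simp only [List.foldl_cons, List.foldl_nil]
      have hna : pvM none a = some a := rfl
      rw [hna, foldl_pvM_eq l (some a), pvM_nc]

-- pvBLoop over the descending range computes the pvM-fold of the per-index values
lemma pvBLoop_eq (n : Nat) (p : List Int) :
    ∀ k : Nat, k ≤ n → ∀ r m t : Nat, ∀ b : Option Int, r + k ≤ n → pvAdvLoop r 0 0 = (m, t) →
      pvBLoop n p ((List.range k).reverse) (m, t, b) =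
        List.foldl pvM b (((List.range k).reverse).map
          (fun i => p.getD (i + (pvAdvLoop (n - i) 0 0).2) 0 - p.getD i 0)) := by
  intro k
  induction k with
  | zero => intro _ r m t b _ _; rfl
  | succ k ih =>
      intro hk r m t b hr hadv
      have hrange : (List.range (k + 1)).reverse = k :: (List.range k).reverse := by
        rw [List.range_succ]; simp
      rw [hrange]
      simp only [pvBLoop, List.map_cons, List.foldl_cons]
      have hcomp : pvAdvLoop (n - k) m t = pvAdvLoop (n - k) 0 0 := by
        have hc := pvAdvLoop_comp r 0 0 (n - k) (by omega)
        rw [hadv] at hc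
        simpa using hc
      rw [hcomp]
      have := ih (by omega) (n - k) (pvAdvLoop (n - k) 0 0).1 (pvAdvLoop (n - k) 0 0).2
        (pvM b (p.getD (k + (pvAdvLoop (n - k) 0 0).2) 0 - p.getD k 0)) (by omega) rfl
      exact this

-- A's fold equals the pvM-fold of the same per-index values
lemma foldA_eq (n : Nat) (p : List Int) :
    (List.range n).foldl (fun acc i => pvM acc (pvCalcLoop n p i 1 0)) (none : Option Int) =
    List.foldl pvM none ((List.range n).map
      (fun i => p.getD (i + (pvAdvLoop (n - i) 0 0).2) 0 - p.getD i 0)) := by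
  rw [← List.foldl_map (f := fun i => pvCalcLoop n p i 1 0) (g := pvM)]
  have hmap : (List.range n).map (fun i => pvCalcLoop n p i 1 0) =
      (List.range n).map (fun i => p.getD (i + (pvAdvLoop (n - i) 0 0).2) 0 - p.getD i 0) := by
    apply List.map_congr_left
    intro i hi
    have hi' : i < n := List.mem_range.mp hi
    rw [pvCalcLoop_eq]
    have hs : (pvAdvLoop (n - i) 0 0).2 = pvSkip n i 1 := by
      have h := pvAdvLoop_skip (n - i) 0 0 n (by omega)
      have hni : n - (n - i) + 0 = i := by omega
      rw [hni] at h
      norm_num at h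
      exact h
    rw [hs]; ring
  rw [hmap]

-- ===== VERDICT (by name: the statement is the Claim_ definition above) =====
theorem find_best_index_and_special_sum_spec : Claim_equal_find_best_index_and_special_sum := by
  intro arr _ _
  unfold Spec_find_best_index_and_special_sum
  have h1 : find_best_index_and_special_sum arr =
      ((List.range arr.length).foldl
        (fun acc i => pvM acc (pvCalcLoop arr.length (pvBuildPrefixA arr) i 1 0))
        (none : Option Int)).getD 0 := rfl
  have h2 : find_best_index_and_special_sum_alt arr =
      (pvBLoop arr.length (pvBuildPrefixA arr) ((List.range arr.length).reverse)
        (0, 0, none)).getD 0 := rfl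
  rw [h1, h2, foldA_eq,
    pvBLoop_eq arr.length (pvBuildPrefixA arr) arr.length (le_refl _) 0 0 0 none (by omega) (pvAdvLoop_stop 0 0 0 (by omega)),
    List.map_reverse, foldl_pvM_reverse]
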